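-- pv_equiv track=rewrite | github.com/daem-uni/dagdim-lab-informatica | lab7/e4_remove.py | sameSet
-- ===== SOURCE A (Python) =====
-- def sameSet(a, b):
--     a_copy = list(a)
--     b_copy = list(b)
--
--     i = len(a_copy) - 1
--
--     while i >= 0:
--         remove = a_copy[i]
--
--         (a_copy, flag) = remove_all(a_copy, remove)
--         (b_copy, flag) = remove_all(b_copy, remove)
--
--         if flag == False:
--             return False
--
--         while i > len(a_copy) - 1:
--             i -= 1
--
--     return len(b_copy) == 0
--
-- def remove_all(array, item):
--     new_list = []
--     flag = False
--     for e in array: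
--         if e != item:
--             new_list.append(e)
--         else:
--             flag = True
--
--     return (new_list, flag)
-- ===== SOURCE B (Python) =====
-- def sameSet(a, b):
--     la = list(a)
--     lb = list(b)
--     return all(x in la for x in lb) and all(y in lb for y in la)
-- ===== Notes on version B (the rewrite author's own statement) =====
-- stated objective: simpler
-- what changed: Replaces A's destructive backward loop (repeatedly deleting the current last element from both list copies and tracking a removal flag) with two independent non-mutating membership scans: every element of b is in a and every element of a is in b.
import Mathlib
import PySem

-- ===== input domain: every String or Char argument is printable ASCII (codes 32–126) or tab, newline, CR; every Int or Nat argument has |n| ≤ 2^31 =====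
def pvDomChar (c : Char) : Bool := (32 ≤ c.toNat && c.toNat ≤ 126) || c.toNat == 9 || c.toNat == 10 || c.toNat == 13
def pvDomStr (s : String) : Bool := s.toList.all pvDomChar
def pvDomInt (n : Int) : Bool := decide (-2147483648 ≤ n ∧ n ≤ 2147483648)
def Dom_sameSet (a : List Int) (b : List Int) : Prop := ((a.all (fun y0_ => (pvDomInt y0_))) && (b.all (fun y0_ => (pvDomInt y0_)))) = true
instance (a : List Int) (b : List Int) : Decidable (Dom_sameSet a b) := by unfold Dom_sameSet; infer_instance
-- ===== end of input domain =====

-- B replaces A's destructive backward deletion loop with two plain membership scans (simpler, same cost).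

-- ===== PORT A =====
-- remove_all(array, item): rebuild the list without `item`, flag = whether it occurred
def removeAll (array : List Int) (item : Int) : List Int × Bool :=
  array.foldl (fun acc e => if e ≠ item then (acc.1 ++ [e], acc.2) else (acc.1, true)) ([], false)

-- inner `while i > len(a_copy) - 1: i -= 1`
def shrinkI (i : Int) (n : Int) : Int :=
  if h : i > n - 1 then shrinkI (i - 1) n else i
termination_by (i - (n - 1)).toNat
decreasing_by omega

-- outer `while i >= 0` loop; fuel bounds the number of iterations (each iteration
-- strictly shrinks a_copy, so a.length + 1 iterations always suffice; the `none`
-- branch of pyGet? is unreachable since i is always a valid index when the loop runs)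
def loopA (fuel : Nat) (a : List Int) (b : List Int) (i : Int) : Bool :=
  match fuel with
  | 0 => false
  | fuel + 1 =>
    if i ≥ 0 then
      match PySem.List.pyGet? a i with
      | none => false
      | some remove =>
        let pa := removeAll a remove
        let pb := removeAll b remove
        if pb.2 = false then false
        else loopA fuel pa.1 pb.1 (shrinkI i pa.1.length)
    else b.length == 0

def sameSet (a : List Int) (b : List Int) : Bool :=
  loopA (a.length + 1) a b ((a.length : Int) - 1)

-- ===== PORT B =====
def sameSet_alt (a : List Int) (b : List Int) : Bool :=
  let la := a
  let lb := b
  (lb.all (fun x => la.contains x)) && (la.all (fun y => lb.contains y))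

-- ===== PRECONDITION & SPEC =====
def Spec_sameSet (a : List Int) (b : List Int) (out : Bool) : Prop := out = sameSet_alt a b
instance (a : List Int) (b : List Int) (out : Bool) : Decidable (Spec_sameSet a b out) := by unfold Spec_sameSet; infer_instance

-- ===== CLAIM (what is proved, stated in full; the proofs are below) =====
def Claim_equal_sameSet : Prop := ∀ (a : List Int) (b : List Int), Dom_sameSet a b → Spec_sameSet a b (sameSet a b)

-- ===== LEMMAS AND PROOFS =====

theorem removeAll_eq (l : List Int) (x : Int) :
    removeAll l x = (l.filter (fun e => e ≠ x), l.contains x) := by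
  have h : ∀ (l : List Int) (acc : List Int) (fl : Bool),
      l.foldl (fun acc e => if e ≠ x then (acc.1 ++ [e], acc.2) else (acc.1, true)) (acc, fl)
        = (acc ++ l.filter (fun e => e ≠ x), fl || l.contains x) := by
    intro l
    induction l with
    | nil => intro acc fl; simp
    | cons hd tl ih =>
      intro acc fl
      by_cases hx : hd = x
      · subst hx
        rw [List.foldl_cons, if_neg (by simp), ih]
        simp
      · rw [List.foldl_cons, if_pos (by simp [hx]), ih]
        have hxh : decide (x = hd) = false := by simp; exact fun h => hx h.symm
        simp [hx, hxh]
  simpa [removeAll] using h l [] false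

theorem shrinkI_eq (i n : Int) (h : n - 1 ≤ i) : shrinkI i n = n - 1 := by
  have key : ∀ (k : Nat) (i : Int), (i - (n - 1)).toNat = k → n - 1 ≤ i → shrinkI i n = n - 1 := by
    intro k
    induction k with
    | zero => intro i hk hle; rw [shrinkI, dif_neg (by omega)]; omega
    | succ k ih => intro i hk hle; rw [shrinkI, dif_pos (by omega)]; exact ih (i - 1) (by omega) (by omega)
  exact key _ i rfl h

theorem alt_nil (b : List Int) : sameSet_alt [] b = (b.length == 0) := by
  cases b <;> simp [sameSet_alt]

theorem alt_step (a b : List Int) (x : Int) (hx : x ∈ a) :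
    sameSet_alt a b =
      (b.contains x && sameSet_alt (a.filter (fun e => e ≠ x)) (b.filter (fun e => e ≠ x))) := by
  rw [Bool.eq_iff_iff]
  simp only [sameSet_alt, Bool.and_eq_true, List.all_eq_true, List.contains_eq_mem,
    List.mem_filter, decide_eq_true_eq]
  constructor
  · rintro ⟨hba, hab⟩
    aesop
  · rintro ⟨hxb, hba, hab⟩
    constructor
    · intro y hy
      by_cases hyx : y = x
      · exact hyx ▸ hx
      · exact (hba y ⟨hy, by simpa using hyx⟩).1
    · intro y hy
      by_cases hyx : y = x
      · exact hyx ▸ hxb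
      · exact (hab y ⟨hy, by simpa using hyx⟩).1

theorem filter_length_lt (a : List Int) (x : Int) (hx : x ∈ a) :
    (a.filter (fun e => e ≠ x)).length < a.length := by
  apply List.length_filter_lt_length_iff_exists.mpr
  exact ⟨x, hx, by simp⟩

theorem loopA_correct : ∀ (n : Nat) (a b : List Int), a.length ≤ n →
    loopA (n + 1) a b ((a.length : Int) - 1) = sameSet_alt a b := by
  intro n
  induction n with
  | zero =>
    intro a b hlen
    have ha : a = [] := List.length_eq_zero_iff.mp (Nat.le_zero.mp hlen)
    subst ha
    rw [loopA, if_neg (by norm_num), alt_nil]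
  | succ n ih =>
    intro a b hlen
    cases ha : a with
    | nil =>
      rw [loopA, if_neg (by norm_num), alt_nil]
    | cons hd tl =>
      subst ha
      have hpos : ((hd :: tl).length : Int) - 1 ≥ 0 := by simp
      have hget : PySem.List.pyGet? (hd :: tl) (((hd :: tl).length : Int) - 1)
          = (hd :: tl).getLast? := by
        rw [show ((hd :: tl).length : Int) - 1 = ((tl.length : Nat) : Int) by simp]
        rw [PySem.List.pyGet?_natCast]
        simp [List.getLast?_eq_getElem?]
      obtain ⟨x, hx⟩ : ∃ x, (hd :: tl).getLast? = some x :=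
        ⟨(hd :: tl).getLast (by simp), List.getLast?_eq_some_getLast (by simp)⟩
      have hxmem : x ∈ hd :: tl := by
        obtain ⟨ys, hys⟩ := List.getLast?_eq_some_iff.mp hx
        rw [hys]; simp
      rw [loopA, if_pos hpos, hget, hx]
      simp only [removeAll_eq]
      by_cases hb : x ∈ b
      · rw [if_neg (by simp [hb])]
        have hlt := filter_length_lt (hd :: tl) x hxmem
        rw [shrinkI_eq _ _ (by omega)]
        rw [ih _ _ (by omega)]
        rw [alt_step (hd :: tl) b x hxmem]
        simp [hb]
      · rw [if_pos (by simp [hb]), alt_step (hd :: tl) b x hxmem]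
        simp [hb]

-- ===== VERDICT (by name: the statement is the Claim_ definition above) =====
theorem sameSet_spec : Claim_equal_sameSet := by
  intro a b _
  show sameSet a b = sameSet_alt a b
  exact loopA_correct a.length a b (le_refl _)
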